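-- pv_equiv track=rewrite | github.com/brewchai/sci-fi-inf | backend/app/services/reel_generator.py | _wrap_caption_text
-- ===== SOURCE A (Python) =====
-- CAPTION_SOFT_MAX_CHARS = 30
--
-- def _wrap_caption_text(chunk: list[dict]) -> str:
--     """Wrap a caption chunk to at most two balanced lines."""
--     words = [item["word"].strip() for item in chunk if item["word"].strip()]
--     if not words:
--         return ""
--     text = " ".join(words)
--     if len(text) <= CAPTION_SOFT_MAX_CHARS:
--         return text
--
--     split_idx = -1
--     total_chars = len(text)
--     left_chars = 0
--     best_delta = None
--
--     for idx in range(1, len(words)):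
--         left_chars += len(words[idx - 1]) + (1 if idx > 1 else 0)
--         right_chars = total_chars - left_chars - 1
--         if len(words[idx:]) == 1:
--             continue
--         delta = abs(left_chars - right_chars)
--         if best_delta is None or delta < best_delta:
--             best_delta = delta
--             split_idx = idx
--
--     if split_idx == -1:
--         return text
--
--     first_line = " ".join(words[:split_idx]).strip()
--     second_line = " ".join(words[split_idx:]).strip()
--     if not first_line or not second_line:
--         return text
--     return f"{first_line}\\N{second_line}"
-- ===== SOURCE B (Python) =====
-- CAPTION_SOFT_MAX_CHARS = 30
--
-- def _wrap_caption_text(chunk: list[dict]) -> str: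
--     """Wrap a caption chunk to at most two balanced lines (table + argmin)."""
--     words = [item["word"].strip() for item in chunk if item["word"].strip()]
--     if not words:
--         return ""
--     text = " ".join(words)
--     if len(text) <= CAPTION_SOFT_MAX_CHARS:
--         return text
--     n = len(words)
--     if n < 3:
--         return text
--     # prefix[i] = len(" ".join(words[:i])); total = prefix[n] = len(text)
--     prefix = [len(" ".join(words[:i])) for i in range(n + 1)]
--     total = prefix[n]
--     # candidate split points leave at least 2 words on the right; leftmost tie wins
--     i = min(range(1, n - 1), key=lambda i: abs(2 * prefix[i] + 1 - total))
--     return " ".join(words[:i]) + "\\N" + " ".join(words[i:])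
-- ===== Notes on version B (the rewrite author's own statement) =====
-- stated objective: simpler
-- what changed: Replaces the running-accumulator loop with three skip/continue branches and the post-loop emptiness guards by an early return for <3 words, a precomputed prefix-length table and a single argmin (min with key) over the valid split indices, joining the two halves directly.
import Mathlib
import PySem

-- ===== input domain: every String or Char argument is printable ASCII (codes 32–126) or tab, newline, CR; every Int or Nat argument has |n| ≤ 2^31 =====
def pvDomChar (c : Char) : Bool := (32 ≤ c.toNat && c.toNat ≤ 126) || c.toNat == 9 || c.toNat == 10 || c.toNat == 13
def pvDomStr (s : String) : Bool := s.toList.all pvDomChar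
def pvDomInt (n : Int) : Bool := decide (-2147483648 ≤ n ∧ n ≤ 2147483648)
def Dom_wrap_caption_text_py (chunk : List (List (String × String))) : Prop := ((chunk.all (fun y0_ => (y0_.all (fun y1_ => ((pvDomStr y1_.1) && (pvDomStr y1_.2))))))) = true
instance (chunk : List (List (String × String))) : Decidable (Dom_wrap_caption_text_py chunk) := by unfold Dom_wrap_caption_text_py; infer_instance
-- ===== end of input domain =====

-- B rewrites A's running-accumulator loop (skip branch, post-loop guards) as an early
-- return for <3 words plus a prefix-length table and one argmin over the valid split
-- indices; same return value on every input where A returns (Pre_ excludes KeyError).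

-- ===== PORT A =====
-- loop body of A's 'for idx in range(1, len(words))' (state: split_idx, left_chars, best_delta)
def wrapA_step (words : List String) (total_chars : Int)
    (s : Int × Int × Option Int) (idx : Int) : Int × Int × Option Int :=
  let left_chars := s.2.1 + PySem.Str.len (PySem.List.pyGetD words (idx - 1) "") + (if 1 < idx then 1 else 0)
  let right_chars := total_chars - left_chars - 1
  if (PySem.List.slice words (some idx) none).length = 1 then
    (s.1, left_chars, s.2.2)
  else
    let delta := |left_chars - right_chars|
    match s.2.2 with
    | none => (idx, left_chars, some delta)
    | some bd => if delta < bd then (idx, left_chars, some delta) else (s.1, left_chars, some bd)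

def wrap_caption_text_py (chunk : List (List (String × String))) : String :=
  let words := (chunk.map (fun item => PySem.Str.strip ((PySem.Dict.mk item).getD "word" ""))).filter (fun w => decide (w ≠ ""))
  if words = [] then ""
  else
    let text := PySem.Str.join " " words
    if PySem.Str.len text ≤ 30 then text
    else
      let total_chars := PySem.Str.len text
      let st := (PySem.List.pyRange 1 (words.length : Int) 1).foldl (wrapA_step words total_chars) (-1, 0, none)
      if st.1 = -1 then text
      else
        let first_line := PySem.Str.strip (PySem.Str.join " " (PySem.List.slice words none (some st.1)))
        let second_line := PySem.Str.strip (PySem.Str.join " " (PySem.List.slice words (some st.1) none))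
        if first_line = "" ∨ second_line = "" then text
        else first_line ++ "\\N" ++ second_line

-- ===== PORT B =====
-- B's argmin key: abs(2*prefix[i] + 1 - total)
def wrapB_key (pre : List Int) (total i : Int) : Int :=
  |2 * PySem.List.pyGetD pre i 0 + 1 - total|

def wrap_caption_text_py_alt (chunk : List (List (String × String))) : String :=
  let words := (chunk.map (fun item => PySem.Str.strip ((PySem.Dict.mk item).getD "word" ""))).filter (fun w => decide (w ≠ ""))
  if words = [] then ""
  else
    let text := PySem.Str.join " " words
    if PySem.Str.len text ≤ 30 then text
    else
      let n : Int := (words.length : Int)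
      if n < 3 then text
      else
        let pre := (PySem.List.pyRange 0 (n + 1) 1).map (fun i => PySem.Str.len (PySem.Str.join " " (PySem.List.slice words none (some i))))
        let total := PySem.List.pyGetD pre n 0
        match PySem.List.min? (PySem.List.pyRange 1 (n - 1) 1) (wrapB_key pre total) with
        | some i => PySem.Str.join " " (PySem.List.slice words none (some i)) ++ "\\N" ++ PySem.Str.join " " (PySem.List.slice words (some i) none)
        | none => text

-- ===== PRECONDITION & SPEC =====
-- Pre_ excludes exactly the inputs where A raises KeyError: some item without a "word" key.
def Pre_wrap_caption_text_py (chunk : List (List (String × String))) : Prop :=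
  ∀ item ∈ chunk, (PySem.Dict.mk item).contains "word" = true
instance (chunk : List (List (String × String))) : Decidable (Pre_wrap_caption_text_py chunk) := by
  unfold Pre_wrap_caption_text_py; infer_instance

def pvWitness_wrap_caption_text_py : (List (List (String × String))) := [[("word", "hello")], [("word", " world ")]]

def Spec_wrap_caption_text_py (chunk : List (List (String × String))) (out : String) : Prop := out = wrap_caption_text_py_alt chunk
instance (chunk : List (List (String × String))) (out : String) : Decidable (Spec_wrap_caption_text_py chunk out) := by unfold Spec_wrap_caption_text_py; infer_instance

-- ===== CLAIM (what is proved, stated in full; the proofs are below) =====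
def Claim_equal_wrap_caption_text_py : Prop := ∀ (chunk : List (List (String × String))), Dom_wrap_caption_text_py chunk → Pre_wrap_caption_text_py chunk → Spec_wrap_caption_text_py chunk (wrap_caption_text_py chunk)

-- ===== LEMMAS AND PROOFS =====

-- ---- generic dropWhile facts ----

theorem pv_dropWhile_append_self (p : Char → Bool) (a b : List Char)
    (ha : List.dropWhile p a = a) (hne : a ≠ []) :
    List.dropWhile p (a ++ b) = a ++ b := by
  cases a with
  | nil => exact absurd rfl hne
  | cons c t =>
    have hc : ¬ p c = true := by simpa using (List.dropWhile_eq_self_iff.mp ha (by simp))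
    simp [hc]

-- ---- strip fixed points ----

theorem pv_lstrip_fix (cs : List Char) (h : PySem.Chars.strip cs = cs) :
    PySem.Chars.lstrip cs = cs := by
  have hsuf : PySem.Chars.lstrip cs <:+ cs := List.dropWhile_suffix _
  have hlen2 : cs.length ≤ (PySem.Chars.lstrip cs).length := by
    conv_lhs => rw [← h]
    unfold PySem.Chars.strip PySem.Chars.rstrip
    simpa using List.length_dropWhile_le PySem.Chars.isspace (PySem.Chars.lstrip cs).reverse
  exact hsuf.eq_of_length (le_antisymm hsuf.length_le hlen2)

theorem pv_rstrip_fix (cs : List Char) (h : PySem.Chars.strip cs = cs) :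
    PySem.Chars.rstrip cs = cs := by
  have hl := pv_lstrip_fix cs h
  unfold PySem.Chars.strip at h
  rw [hl] at h
  exact h

theorem pv_rstrip_idem (x : List Char) :
    PySem.Chars.rstrip (PySem.Chars.rstrip x) = PySem.Chars.rstrip x := by
  unfold PySem.Chars.rstrip
  simp [List.dropWhile_idempotent]

theorem pv_lstrip_rstrip (y : List Char) (hy : PySem.Chars.lstrip y = y) :
    PySem.Chars.lstrip (PySem.Chars.rstrip y) = PySem.Chars.rstrip y := by
  have hpre : PySem.Chars.rstrip y <+: y := by
    unfold PySem.Chars.rstrip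
    have hs := List.dropWhile_suffix (l := y.reverse) (p := PySem.Chars.isspace)
    have hrev := hs.reverse
    simpa using hrev
  obtain ⟨r, hr⟩ := hpre
  cases hz : PySem.Chars.rstrip y with
  | nil => simp [PySem.Chars.lstrip]
  | cons c zt =>
    rw [hz] at hr
    have hyne : 0 < y.length := by rw [← hr]; simp
    have hc : ¬ PySem.Chars.isspace (y[0]'hyne) = true :=
      List.dropWhile_eq_self_iff.mp hy hyne
    have h0 : y[0]'hyne = c := by
      simp [← hr]
    rw [h0] at hc
    unfold PySem.Chars.lstrip
    simp [hc]

theorem pv_chars_strip_idem (cs : List Char) :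
    PySem.Chars.strip (PySem.Chars.strip cs) = PySem.Chars.strip cs := by
  have hy : PySem.Chars.lstrip (PySem.Chars.lstrip cs) = PySem.Chars.lstrip cs := by
    unfold PySem.Chars.lstrip
    exact List.dropWhile_idempotent _ _
  show PySem.Chars.strip (PySem.Chars.rstrip (PySem.Chars.lstrip cs)) = _
  unfold PySem.Chars.strip
  rw [pv_lstrip_rstrip _ hy]
  exact pv_rstrip_idem _

theorem pv_str_ext (s t : String) (h : s.toList = t.toList) : s = t := by
  rw [← show String.ofList s.toList = s from String.ofList_toList,
      ← show String.ofList t.toList = t from String.ofList_toList, h]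

theorem pv_str_strip_idem (s : String) :
    PySem.Str.strip (PySem.Str.strip s) = PySem.Str.strip s := by
  apply pv_str_ext
  simp only [PySem.Str.toList_strip]
  exact pv_chars_strip_idem s.toList

-- ---- join facts ----

theorem pv_join_snoc (sep : List Char) (ps : List (List Char)) (q : List Char) :
    PySem.Chars.join sep (ps ++ [q])
      = if ps = [] then q else PySem.Chars.join sep ps ++ sep ++ q := by
  induction ps with
  | nil => simp [PySem.Chars.join_singleton]
  | cons a t ih =>
    cases t with
    | nil =>
      simp [PySem.Chars.join_cons_cons, PySem.Chars.join_singleton]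
    | cons b t' =>
      have h1 : PySem.Chars.join sep (a :: b :: (t' ++ [q]))
          = a ++ sep ++ PySem.Chars.join sep (b :: (t' ++ [q])) :=
        PySem.Chars.join_cons_cons sep a b (t' ++ [q])
      have h2 : PySem.Chars.join sep (a :: b :: t')
          = a ++ sep ++ PySem.Chars.join sep (b :: t') :=
        PySem.Chars.join_cons_cons sep a b t'
      have h3 : (a :: b :: t') ++ [q] = a :: b :: (t' ++ [q]) := by simp
      rw [h3, h1, show b :: (t' ++ [q]) = (b :: t') ++ [q] by simp, ih]
      simp [h2, List.append_assoc]

theorem pv_join_ne_nil (sep : List Char) (q : List Char) (t : List (List Char)) (hq : q ≠ []) :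
    PySem.Chars.join sep (q :: t) ≠ [] := by
  cases t with
  | nil => simpa [PySem.Chars.join_singleton] using hq
  | cons b t' =>
    rw [PySem.Chars.join_cons_cons]
    simp [hq]

theorem pv_rstrip_append (a b : List Char)
    (hb : PySem.Chars.rstrip b = b) (hne : b ≠ []) :
    PySem.Chars.rstrip (a ++ b) = a ++ b := by
  have hb' : List.dropWhile PySem.Chars.isspace b.reverse = b.reverse := by
    have := congrArg List.reverse hb
    unfold PySem.Chars.rstrip at this
    simpa using this
  unfold PySem.Chars.rstrip
  rw [List.reverse_append]
  rw [pv_dropWhile_append_self _ _ _ hb' (by simpa using hne)]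
  simp

theorem pv_rstrip_join (ps : List (List Char)) (hne : ps ≠ [])
    (h : ∀ p ∈ ps, PySem.Chars.strip p = p ∧ p ≠ []) :
    PySem.Chars.rstrip (PySem.Chars.join [' '] ps) = PySem.Chars.join [' '] ps := by
  induction ps with
  | nil => exact absurd rfl hne
  | cons a t ih =>
    cases t with
    | nil =>
      rw [PySem.Chars.join_singleton]
      exact pv_rstrip_fix a (h a (by simp)).1
    | cons b t' =>
      rw [PySem.Chars.join_cons_cons]
      have hb : PySem.Chars.join [' '] (b :: t') ≠ [] :=
        pv_join_ne_nil [' '] b t' (h b (by simp)).2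
      have hrec : PySem.Chars.rstrip (PySem.Chars.join [' '] (b :: t')) = PySem.Chars.join [' '] (b :: t') := by
        apply ih (by simp)
        intro p hp
        apply h p
        simp only [List.mem_cons] at hp ⊢
        tauto
      rw [List.append_assoc]
      have hres := pv_rstrip_append (a ++ [' ']) (PySem.Chars.join [' '] (b :: t')) hrec hb
      rw [List.append_assoc] at hres
      exact hres

theorem pv_strip_join (ps : List (List Char)) (hne : ps ≠ [])
    (h : ∀ p ∈ ps, PySem.Chars.strip p = p ∧ p ≠ []) :
    PySem.Chars.strip (PySem.Chars.join [' '] ps) = PySem.Chars.join [' '] ps := by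
  have hl : PySem.Chars.lstrip (PySem.Chars.join [' '] ps) = PySem.Chars.join [' '] ps := by
    cases ps with
    | nil => exact absurd rfl hne
    | cons q t =>
      have hq := h q (by simp)
      have hql : PySem.Chars.lstrip q = q := pv_lstrip_fix q hq.1
      cases t with
      | nil =>
        rw [PySem.Chars.join_singleton]; exact hql
      | cons b t' =>
        rw [PySem.Chars.join_cons_cons, List.append_assoc]
        unfold PySem.Chars.lstrip
        unfold PySem.Chars.lstrip at hql
        exact pv_dropWhile_append_self _ q _ hql hq.2
  unfold PySem.Chars.strip
  rw [hl]
  exact pv_rstrip_join ps hne h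

theorem pv_strip_join_str (parts : List String) (hne : parts ≠ [])
    (h : ∀ p ∈ parts, PySem.Str.strip p = p ∧ p ≠ "") :
    PySem.Str.strip (PySem.Str.join " " parts) = PySem.Str.join " " parts := by
  apply pv_str_ext
  simp only [PySem.Str.toList_strip, PySem.Str.toList_join]
  have hsep : (" " : String).toList = [' '] := rfl
  rw [hsep]
  apply pv_strip_join
  · simpa using hne
  · intro p hp
    obtain ⟨p', hp', rfl⟩ := List.mem_map.mp hp
    obtain ⟨h1, h2⟩ := h p' hp'
    constructor
    · have hcg := congrArg String.toList h1
      simpa [PySem.Str.toList_strip] using hcg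
    · intro h0
      apply h2
      rw [← show String.ofList p'.toList = p' from String.ofList_toList, h0]

theorem pv_join_ne_empty (parts : List String) (hne : parts ≠ [])
    (h : ∀ p ∈ parts, p ≠ "") :
    PySem.Str.join " " parts ≠ "" := by
  obtain ⟨q, t, rfl⟩ := List.exists_cons_of_ne_nil hne
  intro hempty
  have h0 : (PySem.Str.join " " (q :: t)).toList = [] := by rw [hempty]; rfl
  rw [PySem.Str.toList_join] at h0
  have hq : q.toList ≠ [] := by
    intro hq0
    apply h q (by simp)
    rw [← show String.ofList q.toList = q from String.ofList_toList, hq0]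
  exact pv_join_ne_nil _ q.toList (t.map String.toList) hq (by simpa using h0)

-- ---- the prefix-length function and the argmin machinery ----

-- length of " ".join(words[:i]) (B's prefix-table entry; A's running left_chars)
def wrapL (ws : List String) (i : Int) : Int :=
  PySem.Str.len (PySem.Str.join " " (PySem.List.slice ws none (some i)))

def wrapKey (ws : List String) (tc i : Int) : Int := |2 * wrapL ws i + 1 - tc|

def argStep (key : Int → Int) (acc : Option Int) (x : Int) : Option Int :=
  match acc with
  | none => some x
  | some m => if key x < key m then some x else some m

theorem pv_min?_eq_foldl (xs : List Int) (key : Int → Int) :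
    PySem.List.min? xs key = xs.foldl (argStep key) none := by
  unfold PySem.List.min?
  apply PySem.List.foldl_congr_mem
  intro acc x _
  cases acc <;> rfl

theorem pv_minfold_congr_aux (k1 k2 : Int → Int) (l : List Int) :
    ∀ (acc : Option Int), (∀ x ∈ l, k1 x = k2 x) → (∀ m, acc = some m → k1 m = k2 m) →
      l.foldl (argStep k1) acc = l.foldl (argStep k2) acc := by
  induction l with
  | nil => intro acc _ _; rfl
  | cons x t ih =>
    intro acc hl hacc
    simp only [List.foldl_cons]
    have hx : k1 x = k2 x := hl x (by simp)
    cases acc with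
    | none =>
      show List.foldl (argStep k1) (some x) t = List.foldl (argStep k2) (some x) t
      exact ih (some x) (fun y hy => hl y (by simp [hy])) (by rintro m ⟨rfl⟩; exact hx)
    | some m =>
      have hm : k1 m = k2 m := hacc m rfl
      have hstep : argStep k1 (some m) x = argStep k2 (some m) x := by
        simp only [argStep, hx, hm]
      rw [hstep]
      cases hc : argStep k2 (some m) x with
      | none =>
        exfalso
        simp only [argStep] at hc
        split at hc <;> cases hc
      | some m' =>
        have hm' : k1 m' = k2 m' := by
          simp only [argStep] at hc
          split at hc
          · cases hc; exact hx
          · cases hc; exact hm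
        exact ih (some m') (fun y hy => hl y (by simp [hy])) (by rintro m'' ⟨rfl⟩; exact hm')

theorem pv_minfold_congr (xs : List Int) (k1 k2 : Int → Int)
    (h : ∀ x ∈ xs, k1 x = k2 x) :
    PySem.List.min? xs k1 = PySem.List.min? xs k2 := by
  rw [pv_min?_eq_foldl, pv_min?_eq_foldl]
  exact pv_minfold_congr_aux k1 k2 xs none h (by simp)

-- ---- wrapL facts ----

theorem pv_wrapL_zero (ws : List String) : wrapL ws 0 = 0 := by
  unfold wrapL
  rw [PySem.List.slice_to ws (by norm_num)]
  simp [PySem.Str.len_eq, PySem.Str.toList_join, PySem.Chars.join_nil]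

theorem pv_wrapL_full (ws : List String) :
    wrapL ws (ws.length : Int) = PySem.Str.len (PySem.Str.join " " ws) := by
  unfold wrapL
  rw [PySem.List.slice_to ws (by positivity)]
  simp

theorem pv_wrapL_succ (ws : List String) (a : Int) (h1 : 1 ≤ a) (h2 : a ≤ (ws.length : Int)) :
    wrapL ws a = wrapL ws (a - 1) + PySem.Str.len (PySem.List.pyGetD ws (a - 1) "") + (if 1 < a then 1 else 0) := by
  have hk : a - 1 = (((a - 1).toNat : Nat) : Int) := by omega
  set k : Nat := (a - 1).toNat with hkdef
  have hklen : k < ws.length := by omega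
  have hget : PySem.List.pyGetD ws (a - 1) "" = ws[k] := by
    rw [hk, PySem.List.pyGetD_natCast]
    exact List.getD_eq_getElem ws "" hklen
  have htake : List.take (k + 1) ws = List.take k ws ++ [ws[k]] := by
    rw [List.take_add_one]
    simp [List.getElem?_eq_getElem hklen]
  have hsliceA : PySem.List.slice ws none (some a) = List.take k ws ++ [ws[k]] := by
    rw [PySem.List.slice_to ws (by omega), show a.toNat = k + 1 by omega]
    exact htake
  have hslice1 : PySem.List.slice ws none (some (a - 1)) = List.take k ws := by
    rw [PySem.List.slice_to ws (by omega)]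
  unfold wrapL
  rw [hsliceA, hslice1, hget]
  rcases Nat.eq_zero_or_pos k with hk0 | hkpos
  · have ha1 : a = 1 := by omega
    subst ha1
    simp [hk0, PySem.Str.len_eq, PySem.Str.toList_join, PySem.Chars.join_nil,
      PySem.Chars.join_singleton]
  · have hne : List.take k ws ≠ [] := by
      have hlt : (List.take k ws).length = k := by rw [List.length_take]; omega
      intro h0
      rw [h0] at hlt
      simp at hlt
      omega
    have h1a : (1 : Int) < a := by omega
    rw [if_pos h1a]
    have hj := pv_join_snoc [' '] ((List.take k ws).map String.toList) (ws[k].toList)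
    rw [if_neg (by simpa using hne)] at hj
    have hsep : (" " : String).toList = [' '] := rfl
    have hmap : (List.take k ws ++ [ws[k]]).map String.toList
        = (List.take k ws).map String.toList ++ [ws[k].toList] := by
      simp only [List.map_append, List.map_cons, List.map_nil]
    simp only [PySem.Str.len_eq, PySem.Str.toList_join, hsep, hmap, hj,
      List.length_append, List.length_cons, List.length_nil]
    push_cast
    ring

-- ---- the main loop lemma ----

def wrapRel (ws : List String) (tc : Int) (s : Int × Int × Option Int) (acc : Option Int) : Prop :=
  (acc = none ∧ s.1 = -1 ∧ s.2.2 = none) ∨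
  (∃ m, acc = some m ∧ s.1 = m ∧ s.2.2 = some (wrapKey ws tc m))

theorem pv_wrap_main (ws : List String) (tc : Int) :
    ∀ (k : Nat) (a : Int), 1 ≤ a → a + k = (ws.length : Int) - 1 →
    ∀ (s : Int × Int × Option Int) (acc : Option Int),
      s.2.1 = wrapL ws (a - 1) → wrapRel ws tc s acc →
      wrapRel ws tc ((PySem.List.pyRange a (ws.length : Int) 1).foldl (wrapA_step ws tc) s)
        ((PySem.List.pyRange a ((ws.length : Int) - 1) 1).foldl (argStep (wrapKey ws tc)) acc) := by
  intro k
  induction k with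
  | zero =>
    intro a h1 h2 s acc hlc hrel
    obtain ⟨sp, lc, bd⟩ := s
    rw [show ((ws.length : Int) - 1) = a by omega]
    rw [PySem.List.pyRange_one_eq_nil (le_refl a)]
    rw [show (ws.length : Int) = a + 1 by omega]
    rw [PySem.List.pyRange_one_cons (by omega), PySem.List.pyRange_one_eq_nil (le_refl (a + 1))]
    simp only [List.foldl_cons, List.foldl_nil]
    have hlen : (PySem.List.slice ws (some a) none).length = 1 := by
      rw [PySem.List.slice_from ws (by omega), List.length_drop]
      omega
    simp only [wrapA_step, hlen, if_pos]
    rcases hrel with ⟨ha, h1', h2'⟩ | ⟨m, ha, h1', h2'⟩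
    · exact Or.inl ⟨ha, h1', h2'⟩
    · exact Or.inr ⟨m, ha, h1', h2'⟩
  | succ k ih =>
    intro a h1 h2 s acc hlc hrel
    obtain ⟨sp, lc, bd⟩ := s
    simp only at hlc
    rw [PySem.List.pyRange_one_cons (show a < (ws.length : Int) by omega)]
    rw [PySem.List.pyRange_one_cons (show a < (ws.length : Int) - 1 by omega)]
    simp only [List.foldl_cons]
    have hlenslice : ¬ (PySem.List.slice ws (some a) none).length = 1 := by
      rw [PySem.List.slice_from ws (by omega), List.length_drop]
      omega
    have hleft : lc + PySem.Str.len (PySem.List.pyGetD ws (a - 1) "") + (if 1 < a then 1 else 0) = wrapL ws a := by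
      rw [hlc]
      exact (pv_wrapL_succ ws a h1 (by omega)).symm
    have hdelta : |wrapL ws a - (tc - wrapL ws a - 1)| = wrapKey ws tc a := by
      unfold wrapKey
      congr 1
      ring
    simp only [wrapA_step, if_neg hlenslice, hleft, hdelta]
    have hmid : a + 1 - 1 = a := by ring
    rcases hrel with ⟨ha, hsp, hbd⟩ | ⟨m, ha, hsp, hbd⟩
    · simp only at hsp hbd
      subst ha
      simp only [hbd, argStep]
      apply ih (a + 1) (by omega) (by omega) (a, wrapL ws a, some (wrapKey ws tc a)) (some a)
      · simp only [hmid]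
      · exact Or.inr ⟨a, rfl, rfl, rfl⟩
    · simp only at hsp hbd
      subst ha
      simp only [hbd, argStep]
      by_cases hc : wrapKey ws tc a < wrapKey ws tc m
      · rw [if_pos hc, if_pos hc]
        apply ih (a + 1) (by omega) (by omega) (a, wrapL ws a, some (wrapKey ws tc a)) (some a)
        · simp only [hmid]
        · exact Or.inr ⟨a, rfl, rfl, rfl⟩
      · rw [if_neg hc, if_neg hc]
        apply ih (a + 1) (by omega) (by omega) (sp, wrapL ws a, some (wrapKey ws tc m)) (some m)
        · simp only [hmid]
        · exact Or.inr ⟨m, rfl, hsp, rfl⟩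

theorem pv_wrap_fold_spec (ws : List String) (tc : Int) (h2 : 2 ≤ (ws.length : Int)) :
    wrapRel ws tc
      ((PySem.List.pyRange 1 (ws.length : Int) 1).foldl (wrapA_step ws tc) (-1, 0, none))
      (PySem.List.min? (PySem.List.pyRange 1 ((ws.length : Int) - 1) 1) (wrapKey ws tc)) := by
  rw [pv_min?_eq_foldl]
  exact pv_wrap_main ws tc ((ws.length : Int) - 2).toNat 1 (le_refl 1) (by omega) (-1, 0, none) none
    (by simpa using (pv_wrapL_zero ws).symm) (Or.inl ⟨rfl, rfl, rfl⟩)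

-- ===== VERDICT (by name: the statement is the Claim_ definition above) =====
theorem wrap_caption_text_py_spec : Claim_equal_wrap_caption_text_py := by
  intro chunk _ _
  unfold Spec_wrap_caption_text_py wrap_caption_text_py wrap_caption_text_py_alt
  set ws := (chunk.map (fun item => PySem.Str.strip ((PySem.Dict.mk item).getD "word" ""))).filter (fun w => decide (w ≠ "")) with hws
  have Hw : ∀ w ∈ ws, PySem.Str.strip w = w ∧ w ≠ "" := by
    intro w hw
    rw [hws] at hw
    have h2 := List.of_mem_filter hw
    have h1 := List.mem_of_mem_filter hw
    obtain ⟨item, _, hitem⟩ := List.mem_map.mp h1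
    refine ⟨?_, by simpa using h2⟩
    rw [← hitem]
    exact pv_str_strip_idem _
  by_cases hnil : ws = []
  · simp [hnil]
  · simp only [if_neg hnil]
    by_cases hlen : PySem.Str.len (PySem.Str.join " " ws) ≤ 30
    · simp only [if_pos hlen]
    · simp only [if_neg hlen]
      set tc := PySem.Str.len (PySem.Str.join " " ws) with htc
      have hN1 : 1 ≤ (ws.length : Int) := by
        have hpos := List.length_pos_of_ne_nil hnil
        omega
      by_cases h3 : (ws.length : Int) < 3
      · rw [if_pos h3]
        have hst : ((PySem.List.pyRange 1 (ws.length : Int) 1).foldl (wrapA_step ws tc) (-1, 0, none)).1 = -1 := by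
          rcases (show (ws.length : Int) = 1 ∨ (ws.length : Int) = 2 by omega) with h | h
          · rw [h, PySem.List.pyRange_one_eq_nil (le_refl 1)]
            rfl
          · have hrel := pv_wrap_fold_spec ws tc (by omega)
            rw [show ((ws.length : Int) - 1) = 1 by omega] at hrel
            rw [pv_min?_eq_foldl, PySem.List.pyRange_one_eq_nil (le_refl 1)] at hrel
            rcases hrel with ⟨_, h1', _⟩ | ⟨m, hm, _, _⟩
            · exact h1'
            · exact absurd hm (by simp [List.foldl_nil])
        rw [if_pos hst]
      · rw [if_neg h3]
        have hpre_get : ∀ x : Int, 0 ≤ x → x < (ws.length : Int) + 1 →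
            PySem.List.pyGetD ((PySem.List.pyRange 0 ((ws.length : Int) + 1) 1).map
              (fun i => PySem.Str.len (PySem.Str.join " " (PySem.List.slice ws none (some i))))) x 0
              = wrapL ws x := by
          intro x hx1 hx2
          exact PySem.List.pyGetD_map_pyRange_of_nonneg _ _ x 0 hx1 hx2
        have htotal : PySem.List.pyGetD ((PySem.List.pyRange 0 ((ws.length : Int) + 1) 1).map
              (fun i => PySem.Str.len (PySem.Str.join " " (PySem.List.slice ws none (some i))))) (ws.length : Int) 0 = tc := by
          rw [hpre_get (ws.length : Int) (by omega) (by omega)]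
          exact pv_wrapL_full ws
        have hkeys : PySem.List.min? (PySem.List.pyRange 1 ((ws.length : Int) - 1) 1)
            (wrapB_key ((PySem.List.pyRange 0 ((ws.length : Int) + 1) 1).map
              (fun i => PySem.Str.len (PySem.Str.join " " (PySem.List.slice ws none (some i)))))
              (PySem.List.pyGetD ((PySem.List.pyRange 0 ((ws.length : Int) + 1) 1).map
                (fun i => PySem.Str.len (PySem.Str.join " " (PySem.List.slice ws none (some i))))) (ws.length : Int) 0))
            = PySem.List.min? (PySem.List.pyRange 1 ((ws.length : Int) - 1) 1) (wrapKey ws tc) := by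
          apply pv_minfold_congr
          intro x hx
          rw [PySem.List.mem_pyRange_one] at hx
          unfold wrapB_key wrapKey
          rw [htotal, hpre_get x (by omega) (by omega)]
        have hrel := pv_wrap_fold_spec ws tc (by omega)
        cases hmin : PySem.List.min? (PySem.List.pyRange 1 ((ws.length : Int) - 1) 1) (wrapKey ws tc) with
        | none =>
          exfalso
          have hnil2 := (PySem.List.min?_eq_none_iff _ _).mp hmin
          rw [PySem.List.pyRange_one_cons (by omega)] at hnil2
          exact List.cons_ne_nil _ _ hnil2
        | some m =>
          rw [hmin] at hrel
          have hm := PySem.List.min?_mem hmin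
          rw [PySem.List.mem_pyRange_one] at hm
          rcases hrel with ⟨hnone, _, _⟩ | ⟨m', hm', hst1, _⟩
          · exact absurd hnone (by simp)
          · have hmm : m' = m := by injection hm' with h; exact h.symm
            rw [hmm] at hst1
            rw [hkeys, hmin]
            rw [if_neg (show ¬ ((PySem.List.pyRange 1 (ws.length : Int) 1).foldl (wrapA_step ws tc) (-1, 0, none)).1 = -1 by rw [hst1]; omega)]
            rw [hst1]
            have hfl_parts : PySem.List.slice ws none (some m) ≠ [] := by
              rw [PySem.List.slice_to ws (by omega)]
              intro h0
              have hc := congrArg List.length h0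
              rw [List.length_take] at hc
              simp only [List.length_nil] at hc
              omega
            have hsl_parts : PySem.List.slice ws (some m) none ≠ [] := by
              rw [PySem.List.slice_from ws (by omega)]
              intro h0
              have hc := congrArg List.length h0
              rw [List.length_drop] at hc
              simp only [List.length_nil] at hc
              omega
            have hmemt : ∀ p, p ∈ PySem.List.slice ws none (some m) → p ∈ ws := by
              intro p hp
              rw [PySem.List.slice_to ws (by omega)] at hp
              exact List.mem_of_mem_take hp
            have hmemd : ∀ p, p ∈ PySem.List.slice ws (some m) none → p ∈ ws := by
              intro p hp
              rw [PySem.List.slice_from ws (by omega)] at hp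
              exact List.mem_of_mem_drop hp
            have hfl := pv_strip_join_str _ hfl_parts (fun p hp => Hw p (hmemt p hp))
            have hsl := pv_strip_join_str _ hsl_parts (fun p hp => Hw p (hmemd p hp))
            rw [hfl, hsl]
            have hflne := pv_join_ne_empty _ hfl_parts (fun p hp => (Hw p (hmemt p hp)).2)
            have hslne := pv_join_ne_empty _ hsl_parts (fun p hp => (Hw p (hmemd p hp)).2)
            rw [if_neg (not_or.mpr ⟨hflne, hslne⟩)]
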